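-- pv_equiv track=rewrite | github.com/Teffa14/AutoPTU | scripts/generate_trainer_class_catalog.py | _prereq_options
-- ===== SOURCE A (Python) =====
-- def _prereq_options(text: str):
--     if not text:
--         return []
--     lines = [line.strip() for line in text.splitlines()]
--     options = []
--     current = []
--     for line in lines:
--         if not line:
--             continue
--         if line.lower() == 'or':
--             if current:
--                 options.append(' '.join(current).strip())
--                 current = []
--             continue
--         current.append(line)
--     if current:
--         options.append(' '.join(current).strip())
--     return options or [text.strip()]
-- ===== SOURCE B (Python) =====
-- def _prereq_options(text: str):
--     if not text:
--         return []
--     toks = [s for s in (ln.strip() for ln in text.splitlines()) if s]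
--     return _groups(toks) or [text.strip()]
--
--
-- def _groups(toks):
--     # recursive span decomposition: skip leading 'or' separators, take one
--     # run of non-'or' lines as a group, recurse on the remainder
--     if not toks:
--         return []
--     head, rest = toks[0], toks[1:]
--     if head.lower() == 'or':
--         return _groups(rest)
--     i = 0
--     while i < len(rest) and rest[i].lower() != 'or':
--         i += 1
--     return [' '.join([head] + rest[:i]).strip()] + _groups(rest[i:])
-- ===== Notes on version B (the rewrite author's own statement) =====
-- stated objective: alternative
-- what changed: Replaces A's single-pass loop with mutable (options, current) accumulator state by a pre-filter of blank lines followed by a recursive span decomposition (skip leading 'or' separators, take one run of non-'or' lines as a group, recurse on the rest).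
import Mathlib
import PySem

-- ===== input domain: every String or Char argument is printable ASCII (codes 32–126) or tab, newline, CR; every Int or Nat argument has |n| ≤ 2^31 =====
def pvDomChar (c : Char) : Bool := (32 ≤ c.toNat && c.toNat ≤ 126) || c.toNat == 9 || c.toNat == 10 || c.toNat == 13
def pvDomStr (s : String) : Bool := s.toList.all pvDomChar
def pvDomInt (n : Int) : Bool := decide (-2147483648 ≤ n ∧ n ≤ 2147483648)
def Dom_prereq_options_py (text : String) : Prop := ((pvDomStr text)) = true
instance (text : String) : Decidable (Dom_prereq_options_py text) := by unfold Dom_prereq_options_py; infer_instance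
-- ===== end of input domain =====

-- B replaces A's accumulator loop by a recursive span decomposition over the blank-filtered lines (alternative decomposition, same cost).

-- ===== PORT A =====
-- the body of A's for-loop over the stripped lines, on state (options, current)
def pvStepA (st : List String × List String) (line : String) : List String × List String :=
  if line = "" then st
  else if PySem.Str.lower line = "or" then
    if st.2 ≠ [] then (st.1 ++ [PySem.Str.strip (PySem.Str.join " " st.2)], []) else st
  else (st.1, st.2 ++ [line])

def prereq_options_py (text : String) : List String :=
  if text = "" then []
  else
    let lines := (PySem.Str.splitlines text).map PySem.Str.strip
    let st := lines.foldl pvStepA ([], [])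
    let options := if st.2 ≠ [] then st.1 ++ [PySem.Str.strip (PySem.Str.join " " st.2)] else st.1
    if options ≠ [] then options else [PySem.Str.strip text]

-- ===== PORT B =====
def pvIsOrB (l : String) : Bool := PySem.Str.lower l == "or"

-- Source B's _groups: skip leading 'or' separators, take one run of non-'or' lines, recurse
def pvGroups : List String → List String
  | [] => []
  | head :: rest =>
    if pvIsOrB head then pvGroups rest
    else PySem.Str.strip (PySem.Str.join " " (head :: rest.takeWhile (fun x => !pvIsOrB x)))
         :: pvGroups (rest.dropWhile (fun x => !pvIsOrB x))
termination_by toks => toks.length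
decreasing_by
· simp
· simp only [List.length_cons]
  exact Nat.lt_succ_of_le (List.length_dropWhile_le _ _)

def prereq_options_py_alt (text : String) : List String :=
  if text = "" then []
  else
    let toks := ((PySem.Str.splitlines text).map PySem.Str.strip).filter (fun s => !(s == ""))
    let options := pvGroups toks
    if options ≠ [] then options else [PySem.Str.strip text]

-- ===== PRECONDITION & SPEC =====
def Spec_prereq_options_py (text : String) (out : List String) : Prop := out = prereq_options_py_alt text
instance (text : String) (out : List String) : Decidable (Spec_prereq_options_py text out) := by unfold Spec_prereq_options_py; infer_instance

-- ===== CLAIM (what is proved, stated in full; the proofs are below) =====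
def Claim_equal_prereq_options_py : Prop := ∀ (text : String), Dom_prereq_options_py text → Spec_prereq_options_py text (prereq_options_py text)

-- ===== LEMMAS AND PROOFS =====

-- the finalization step of A's loop (proof-only helper)
def pvFinal (st : List String × List String) : List String :=
  if st.2 ≠ [] then st.1 ++ [PySem.Str.strip (PySem.Str.join " " st.2)] else st.1

-- the loop body ignores blank lines, so folding over all lines = folding over the non-blank ones
theorem pv_fold_filter (lines : List String) (st : List String × List String) :
    lines.foldl pvStepA st = (lines.filter (fun s => !(s == ""))).foldl pvStepA st := by
  induction lines generalizing st with
  | nil => rfl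
  | cons l ls ih =>
    by_cases h : l = ""
    · subst h
      simp only [List.filter_cons, BEq.rfl, Bool.not_true]
      simp [pvStepA, ih]
    · have hb : (l == "") = false := by simp [h]
      simp only [List.filter_cons, hb, Bool.not_false]
      simp [List.foldl_cons, ih]

theorem pv_takeWhile_append {p : String → Bool} (t rest : List String)
    (ht : ∀ x ∈ t, p x = true) : (t ++ rest).takeWhile p = t ++ rest.takeWhile p := by
  induction t with
  | nil => rfl
  | cons a t ih =>
    simp only [List.cons_append, List.takeWhile_cons, ht a (by simp)]
    simp [ih (fun x hx => ht x (by simp [hx]))]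

theorem pv_dropWhile_append {p : String → Bool} (t rest : List String)
    (ht : ∀ x ∈ t, p x = true) : (t ++ rest).dropWhile p = rest.dropWhile p := by
  induction t with
  | nil => rfl
  | cons a t ih =>
    simp only [List.cons_append, List.dropWhile_cons, ht a (by simp)]
    simp [ih (fun x hx => ht x (by simp [hx]))]

-- pvGroups on a nonempty block of non-'or' lines followed by anything
theorem pv_groups_block (h : String) (t rest : List String)
    (hh : pvIsOrB h = false) (ht : ∀ x ∈ t, pvIsOrB x = false) :
    pvGroups (h :: (t ++ rest)) =
      PySem.Str.strip (PySem.Str.join " " (h :: (t ++ rest.takeWhile (fun x => !pvIsOrB x))))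
        :: pvGroups (rest.dropWhile (fun x => !pvIsOrB x)) := by
  rw [pvGroups]
  simp only [hh, Bool.false_eq_true, if_false]
  rw [pv_takeWhile_append t rest (fun x hx => by simp [ht x hx]),
      pv_dropWhile_append t rest (fun x hx => by simp [ht x hx])]

-- skipping a separator
theorem pv_groups_or (l : String) (toks : List String) (h : pvIsOrB l = true) :
    pvGroups (l :: toks) = pvGroups toks := by
  rw [pvGroups]; simp [h]

-- main invariant: finalizing A's fold over non-blank lines = options so far ++ B's groups of current ++ remaining lines
theorem pv_main (toks : List String) (st : List String × List String)
    (hne : ∀ l ∈ toks, l ≠ "") (hcur : ∀ l ∈ st.2, pvIsOrB l = false) :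
    pvFinal (toks.foldl pvStepA st) = st.1 ++ pvGroups (st.2 ++ toks) := by
  induction toks generalizing st with
  | nil =>
    match st, hcur with
    | (opts, []), _ => simp [pvFinal, pvGroups]
    | (opts, h :: t), hcur =>
      have hh : pvIsOrB h = false := hcur h (by simp)
      have ht : ∀ x ∈ t, pvIsOrB x = false := fun x hx => hcur x (by simp [hx])
      simp only [List.foldl_nil, List.append_nil]
      rw [show (h :: t) = h :: (t ++ ([] : List String)) by simp,
          pv_groups_block h t [] hh ht]
      simp [pvFinal, pvGroups]
  | cons l toks ih =>
    have hl : l ≠ "" := hne l (by simp)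
    have hne' : ∀ x ∈ toks, x ≠ "" := fun x hx => hne x (by simp [hx])
    rw [List.foldl_cons]
    by_cases hOr : PySem.Str.lower l = "or"
    · have hOrB : pvIsOrB l = true := by simp [pvIsOrB, hOr]
      match st, hcur with
      | (opts, []), _ =>
        have hstep : pvStepA (opts, []) l = (opts, []) := by simp [pvStepA, hl, hOr]
        rw [hstep, ih (opts, []) hne' (by simp)]
        simp [pv_groups_or l toks hOrB]
      | (opts, h :: t), hcur =>
        have hh : pvIsOrB h = false := hcur h (by simp)
        have ht : ∀ x ∈ t, pvIsOrB x = false := fun x hx => hcur x (by simp [hx])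
        have hstep : pvStepA (opts, h :: t) l
            = (opts ++ [PySem.Str.strip (PySem.Str.join " " (h :: t))], []) := by
          simp [pvStepA, hl, hOr]
        rw [hstep, ih _ hne' (by simp)]
        rw [show (h :: t) ++ l :: toks = h :: (t ++ l :: toks) by simp,
            pv_groups_block h t (l :: toks) hh ht]
        simp only [List.takeWhile_cons, List.dropWhile_cons, hOrB, Bool.not_true,
          Bool.false_eq_true, if_false, List.append_nil, List.nil_append]
        rw [pv_groups_or l toks hOrB]
        simp [List.append_assoc]
    · have hOrB : pvIsOrB l = false := by simp [pvIsOrB, hOr]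
      have hstep : pvStepA st l = (st.1, st.2 ++ [l]) := by simp [pvStepA, hl, hOr]
      rw [hstep, ih (st.1, st.2 ++ [l]) hne'
            (fun x hx => by
              rcases List.mem_append.mp hx with hx | hx
              · exact hcur x hx
              · simp at hx; subst hx; exact hOrB)]
      simp [List.append_assoc]

-- ===== VERDICT (by name: the statement is the Claim_ definition above) =====
theorem prereq_options_py_spec : Claim_equal_prereq_options_py := by
  intro text _
  unfold Spec_prereq_options_py prereq_options_py prereq_options_py_alt
  by_cases h : text = ""
  · simp [h]
  · simp only [h, if_false]
    rw [pv_fold_filter]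
    have := pv_main (((PySem.Str.splitlines text).map PySem.Str.strip).filter (fun s => !(s == "")))
      ([], []) (fun l hl => by simpa using (List.mem_filter.mp hl).2) (by simp)
    simp only [List.nil_append] at this
    simp only [pvFinal] at this
    rw [this]
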